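-- pv_equiv track=rewrite | github.com/maperghis/data_structures_and_algorithms | src/arrays/missingElement.py | finder1
-- ===== SOURCE A (Python) =====
-- def finder1(arr1, arr2):
--     """My solution 0(n)"""
--     arr1.sort()
--     new_arr = sorted(arr2)
--     for num in arr1:
--         if num not in new_arr:
--             return num
--         else:
--             index = new_arr.index(num)
--             new_arr = new_arr[:index] + new_arr[index+1:]
--     return -1
-- ===== SOURCE B (Python) =====
-- def finder1(arr1, arr2):
--     """Counting min-selection: no sorting and no scan of arr1 in order.
--     Count both arrays once, then take the minimum value whose count in arr1
--     exceeds its count in arr2 (that is exactly the first unmatched element A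
--     meets on its sorted scan); -1 if every value is covered.
--     Unlike A, does not mutate (sort) arr1."""
--     c1 = {}
--     for x in arr1:
--         c1[x] = c1.get(x, 0) + 1
--     c2 = {}
--     for x in arr2:
--         c2[x] = c2.get(x, 0) + 1
--     best = None
--     for v, n in c1.items():
--         if n > c2.get(v, 0) and (best is None or v < best):
--             best = v
--     return -1 if best is None else best
-- ===== Notes on version B (the rewrite author's own statement) =====
-- stated objective: faster
-- what changed: Replaces A's sort of both arrays and quadratic consume-by-index/slice scan by two frequency dictionaries built in one pass each and a min-selection over the values whose arr1 count exceeds their arr2 count (no sorting at all); B does not mutate arr1, A sorts it in place.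
import Mathlib
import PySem

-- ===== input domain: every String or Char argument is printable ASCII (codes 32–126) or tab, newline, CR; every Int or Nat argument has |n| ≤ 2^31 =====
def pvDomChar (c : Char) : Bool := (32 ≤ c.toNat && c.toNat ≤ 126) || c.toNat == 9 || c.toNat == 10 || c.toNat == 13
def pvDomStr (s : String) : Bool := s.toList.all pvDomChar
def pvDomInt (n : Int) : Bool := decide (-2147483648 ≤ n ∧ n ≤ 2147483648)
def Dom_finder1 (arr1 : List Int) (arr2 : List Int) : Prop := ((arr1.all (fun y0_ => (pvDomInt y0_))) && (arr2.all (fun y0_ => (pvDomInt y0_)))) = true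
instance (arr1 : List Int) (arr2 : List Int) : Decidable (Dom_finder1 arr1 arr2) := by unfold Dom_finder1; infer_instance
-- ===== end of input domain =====

-- B avoids sorting entirely: it counts both arrays once and takes the minimum value whose
-- count in arr1 exceeds its count in arr2. Equivalence is about the return value: A sorts
-- arr1 in place (an observable side effect), B does not mutate arr1.

-- ===== PORT A =====
-- for num in arr1: if num not in new_arr: return num else remove new_arr[index] by slicing
def finder1Loop : List Int → List Int → Int
  | [], _ => -1
  | num :: rest, newArr =>
    match PySem.List.index? newArr num with
    | none => num            -- 'num not in new_arr'
    | some index =>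
        finder1Loop rest
          (PySem.List.slice newArr none (some (index : Int)) ++
           PySem.List.slice newArr (some ((index : Int) + 1)) none)

def finder1 (arr1 : List Int) (arr2 : List Int) : Int :=
  finder1Loop (PySem.List.sorted arr1 (fun x => x) false)
              (PySem.List.sorted arr2 (fun x => x) false)

-- ===== PORT B =====
-- c1, c2: the two 'd[x] = d.get(x, 0) + 1' counting loops; then the min-selection loop over c1.items()
def finder1_alt (arr1 : List Int) (arr2 : List Int) : Int :=
  let c1 := arr1.foldl (fun d x => d.insert x (d.getD x 0 + 1)) (PySem.Dict.empty : PySem.Dict Int Int)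
  let c2 := arr2.foldl (fun d x => d.insert x (d.getD x 0 + 1)) (PySem.Dict.empty : PySem.Dict Int Int)
  let best := c1.items.foldl
    (fun best p =>
      if decide (c2.getD p.1 0 < p.2) && best.elim true (fun b => decide (p.1 < b))
      then some p.1 else best) none
  match best with
  | none => -1
  | some b => b

-- ===== PRECONDITION & SPEC =====
def Spec_finder1 (arr1 : List Int) (arr2 : List Int) (out : Int) : Prop := out = finder1_alt arr1 arr2
instance (arr1 : List Int) (arr2 : List Int) (out : Int) : Decidable (Spec_finder1 arr1 arr2 out) := by unfold Spec_finder1; infer_instance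

-- ===== CLAIM (what is proved, stated in full; the proofs are below) =====
def Claim_equal_finder1 : Prop := ∀ (arr1 : List Int) (arr2 : List Int), Dom_finder1 arr1 arr2 → Spec_finder1 arr1 arr2 (finder1 arr1 arr2)

-- ===== LEMMAS AND PROOFS =====

-- The common answer specification: r is -1 and no value of a exceeds its budget in b,
-- or r is the least value occurring more often in a than in b.
def IsAns (a b : List Int) (r : Int) : Prop :=
  (r = -1 ∧ ∀ v : Int, a.count v ≤ b.count v) ∨
  (b.count r < a.count r ∧ ∀ v : Int, b.count v < a.count v → r ≤ v)

lemma isAns_unique (a b : List Int) (r1 r2 : Int)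
    (h1 : IsAns a b r1) (h2 : IsAns a b r2) : r1 = r2 := by
  rcases h1 with ⟨e1, h1⟩ | ⟨c1, m1⟩ <;> rcases h2 with ⟨e2, h2⟩ | ⟨c2, m2⟩
  · rw [e1, e2]
  · exact absurd c2 (not_lt.mpr (h1 r2))
  · exact absurd c1 (not_lt.mpr (h2 r1))
  · exact le_antisymm (m1 r2 c2) (m2 r1 c1)

-- counts only: IsAns transfers across permutations
lemma isAns_perm {a a' b b' : List Int} (ha : a.Perm a') (hb : b.Perm b') (r : Int)
    (h : IsAns a b r) : IsAns a' b' r := by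
  unfold IsAns at *
  simp only [← ha.count_eq, ← hb.count_eq]
  exact h

-- A's slice-removal at the first index of num is List.erase.
lemma slice_removal_eq_erase (newArr : List Int) (num : Int) (index : Nat)
    (h : PySem.List.index? newArr num = some index) :
    PySem.List.slice newArr none (some (index : Int)) ++
      PySem.List.slice newArr (some ((index : Int) + 1)) none = newArr.erase num := by
  have h1 : PySem.List.slice newArr none (some (index : Int)) = newArr.take index :=
    PySem.List.slice_to_natCast ..
  have h2 : PySem.List.slice newArr (some ((index : Int) + 1)) none = newArr.drop (index + 1) := by
    have := PySem.List.slice_from_natCast newArr (index + 1)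
    push_cast at this ⊢
    exact this
  rw [h1, h2, ← List.eraseIdx_eq_take_drop_succ]
  rw [PySem.List.index?_eq_idxOf?] at h
  have hidx : newArr.idxOf num = index := by
    rw [List.idxOf_eq_getD_idxOf?, h]; rfl
  rw [← hidx, List.eraseIdx_idxOf_eq_erase]

-- A's loop on a sorted first list returns the IsAns answer.
lemma A_loop_isAns (xs : List Int) : ∀ t : List Int,
    xs.Pairwise (· ≤ ·) → IsAns xs t (finder1Loop xs t) := by
  induction xs with
  | nil =>
    intro t _
    left
    exact ⟨rfl, fun v => by simp⟩
  | cons x rest ih =>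
    intro t hp
    rw [List.pairwise_cons] at hp
    obtain ⟨hx, hrest⟩ := hp
    cases hmem : PySem.List.index? t x with
    | none =>
      have hxt : x ∉ t := (PySem.List.index?_eq_none_iff t x).mp hmem
      simp only [finder1Loop, hmem]
      right
      constructor
      · rw [List.count_eq_zero.mpr hxt, List.count_cons_self]
        omega
      · intro v hv
        have hvmem : v ∈ x :: rest := List.count_pos_iff.mp (by omega)
        rcases List.mem_cons.mp hvmem with h | h
        · exact le_of_eq h.symm
        · exact hx v h
    | some index =>
      have hxt : x ∈ t := by
        have : (PySem.List.index? t x).isSome := by rw [hmem]; rfl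
        exact (PySem.List.index?_isSome_iff t x).mp this
      have htc : 0 < t.count x := List.count_pos_iff.mpr hxt
      simp only [finder1Loop, hmem, slice_removal_eq_erase t x index hmem]
      have key : ∀ v : Int,
          ((t.erase x).count v < rest.count v ↔ t.count v < (x :: rest).count v) ∧
          (rest.count v ≤ (t.erase x).count v ↔ (x :: rest).count v ≤ t.count v) := by
        intro v
        by_cases hv : v = x
        · subst hv
          rw [List.count_erase_self, List.count_cons_self]
          omega
        · rw [List.count_erase_of_ne hv]
          have : (x :: rest).count v = rest.count v := by
            simp [List.count_cons]
            omega
          rw [this]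
          exact ⟨⟨id, id⟩, ⟨id, id⟩⟩
      rcases ih (t.erase x) hrest with ⟨hr, hall⟩ | ⟨hc, hmin⟩
      · left
        exact ⟨hr, fun v => (key v).2.mp (hall v)⟩
      · right
        exact ⟨(key _).1.mp hc, fun v hv => hmin v ((key v).1.mpr hv)⟩

-- B's min-selection fold, characterized.
lemma minFold_spec (P : Int → Bool) (ks : List Int) : ∀ acc : Option Int,
    (ks.foldl (fun best v => if P v && best.elim true (fun b => decide (v < b))
               then some v else best) acc = none →
       acc = none ∧ ∀ v ∈ ks, P v = false) ∧
    (∀ m, ks.foldl (fun best v => if P v && best.elim true (fun b => decide (v < b))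
               then some v else best) acc = some m →
       ((P m = true ∧ m ∈ ks) ∨ acc = some m) ∧
       (∀ v ∈ ks, P v = true → m ≤ v) ∧
       (∀ a, acc = some a → m ≤ a)) := by
  induction ks with
  | nil =>
    intro acc
    refine ⟨fun h => ⟨h, by simp⟩, fun m h => ⟨Or.inr h, by simp, ?_⟩⟩
    intro a ha
    simp only [List.foldl_nil] at h
    rw [ha] at h
    exact le_of_eq (Option.some.inj h).symm
  | cons v ks ih =>
    intro acc
    simp only [List.foldl_cons]
    by_cases hc : (P v && acc.elim true (fun b => decide (v < b))) = true
    · rw [if_pos hc]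
      have hPv : P v = true := (Bool.and_eq_true _ _).mp hc |>.1
      constructor
      · intro h
        exact absurd ((ih (some v)).1 h).1 (by simp)
      · intro m h
        obtain ⟨h1, h2, h3⟩ := (ih (some v)).2 m h
        have hmv : m ≤ v := h3 v rfl
        refine ⟨?_, ?_, ?_⟩
        · rcases h1 with ⟨hpm, hm⟩ | hm
          · exact Or.inl ⟨hpm, List.mem_cons_of_mem _ hm⟩
          · exact Or.inl ⟨(Option.some.inj hm) ▸ hPv, (Option.some.inj hm) ▸ List.mem_cons_self⟩
        · intro w hw hPw
          rcases List.mem_cons.mp hw with h | h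
          · exact h ▸ hmv
          · exact h2 w h hPw
        · intro a ha
          have : (Option.some a).elim true (fun b => decide (v < b)) = true := by
            rw [← ha]; exact ((Bool.and_eq_true _ _).mp hc).2
          simp only [Option.elim, decide_eq_true_eq] at this
          exact le_of_lt (lt_of_le_of_lt hmv this)
    · rw [if_neg hc]
      constructor
      · intro h
        obtain ⟨hacc, hall⟩ := (ih acc).1 h
        refine ⟨hacc, fun w hw => ?_⟩
        rcases List.mem_cons.mp hw with hwv | hwk
        · subst hwv
          rw [hacc] at hc
          simpa using hc
        · exact hall w hwk
      · intro m h
        obtain ⟨h1, h2, h3⟩ := (ih acc).2 m h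
        refine ⟨?_, ?_, h3⟩
        · rcases h1 with ⟨hpm, hm⟩ | hm
          · exact Or.inl ⟨hpm, List.mem_cons_of_mem _ hm⟩
          · exact Or.inr hm
        · intro w hw hPw
          rcases List.mem_cons.mp hw with hwv | hwk
          · subst hwv
            rw [hPw] at hc
            simp only [Bool.true_and] at hc
            cases hacc : acc with
            | none => rw [hacc] at hc; simp at hc
            | some a =>
              rw [hacc] at hc
              simp only [Option.elim, decide_eq_true_eq] at hc
              exact le_trans (h3 a hacc) (not_lt.mp hc)
          · exact h2 w hwk hPw

-- B returns the IsAns answer for the raw (unsorted) arrays.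
lemma B_isAns (arr1 arr2 : List Int) : IsAns arr1 arr2 (finder1_alt arr1 arr2) := by
  unfold finder1_alt
  simp only [PySem.Dict.foldl_insert_getD_add_one_eq_counter, PySem.Dict.items_counter,
    List.foldl_map, PySem.Dict.getD_counter]
  set P : Int → Bool := fun v => decide (arr2.count v < arr1.count v) with hP
  have hfold : ∀ (p : Int × Int), p ∈ (PySem.Set.ofList arr1).map
      (fun k => (k, (arr1.count k : Int))) → True := fun _ _ => trivial
  -- the composed fold is exactly minFold with predicate P
  have hcomp : (fun (best : Option Int) (k : Int) =>
      if decide ((arr2.count k : Int) < ((arr1.count k : Nat) : Int)) &&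
         best.elim true (fun b => decide (k < b))
      then some k else best) =
      (fun (best : Option Int) (v : Int) =>
      if P v && best.elim true (fun b => decide (v < b)) then some v else best) := by
    funext best k
    have : decide ((arr2.count k : Int) < ((arr1.count k : Nat) : Int)) = P k := by
      simp [hP]
    rw [this]
  rw [hcomp]
  cases hres : (PySem.Set.ofList arr1).foldl
      (fun (best : Option Int) (v : Int) =>
        if P v && best.elim true (fun b => decide (v < b)) then some v else best) none with
  | none =>
    left
    refine ⟨rfl, fun v => ?_⟩
    by_cases hv : v ∈ arr1
    · have := ((minFold_spec P (PySem.Set.ofList arr1) none).1 hres).2 v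
        ((PySem.Set.mem_ofList _ _).mpr hv)
      rw [hP] at this
      simpa using this
    · rw [List.count_eq_zero.mpr hv]
      exact Nat.zero_le _
  | some m =>
    right
    obtain ⟨h1, h2, _⟩ := (minFold_spec P (PySem.Set.ofList arr1) none).2 m hres
    rcases h1 with ⟨hpm, _⟩ | hm
    · refine ⟨by simpa [hP] using hpm, fun v hv => ?_⟩
      have hvmem : v ∈ arr1 := List.count_pos_iff.mp (by omega)
      exact h2 v ((PySem.Set.mem_ofList _ _).mpr hvmem) (by simp [hP, hv])
    · exact absurd hm (by simp)

-- ===== VERDICT (by name: the statement is the Claim_ definition above) =====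
theorem finder1_spec : Claim_equal_finder1 := by
  intro arr1 arr2 _
  unfold Spec_finder1
  have hA : IsAns arr1 arr2 (finder1 arr1 arr2) := by
    unfold finder1
    exact isAns_perm (PySem.List.sorted_perm arr1 _ _) (PySem.List.sorted_perm arr2 _ _) _
      (A_loop_isAns _ _ (by simpa using PySem.List.sorted_pairwise arr1 (fun x => x)))
  exact isAns_unique arr1 arr2 _ _ hA (B_isAns arr1 arr2)
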